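-- pv_equiv track=rewrite | github.com/dzg2723/KattisSolutions | HoneyHeist.py | gridToComb
-- ===== SOURCE A (Python) =====
-- def gridToComb(row, slot, edge_length):
--     #Handle DNE Cases
--     if (row <= 0 or row > 2*edge_length-1):
--         return 0
--
--     if (slot <= 0) or (row <= edge_length and slot >= edge_length+row
--                        ) or (row > edge_length and slot > (3*edge_length-row-1)):
--         return 0
--
--     combID = 0
--     adder = 0
--     for i in range(1, row):
--         combID += edge_length + adder
--         if ( i < edge_length):
--             adder += 1
--         else:
--             adder -= 1
--     combID += slot
--     return combID
-- ===== SOURCE B (Python) =====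
-- def gridToComb(row, slot, edge_length):
--     n = edge_length
--     if row <= 0 or row > 2 * n - 1:
--         return 0
--     if slot <= 0 or (row <= n and slot >= n + row) or (row > n and slot > 3 * n - row - 1):
--         return 0
--     if row <= n:
--         k = row - 1
--         before = k * n + k * (k - 1) // 2
--     else:
--         m = row - 1 - n
--         before = n * n + n * (n - 1) // 2 + m * (2 * n - 2) - m * (m - 1) // 2
--     return before + slot
-- ===== Notes on version B (the rewrite author's own statement) =====
-- stated objective: faster
-- what changed: Replaces the O(row) loop accumulating row lengths with closed-form arithmetic-series sums for the increasing and decreasing phases, giving O(1).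
import Mathlib
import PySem

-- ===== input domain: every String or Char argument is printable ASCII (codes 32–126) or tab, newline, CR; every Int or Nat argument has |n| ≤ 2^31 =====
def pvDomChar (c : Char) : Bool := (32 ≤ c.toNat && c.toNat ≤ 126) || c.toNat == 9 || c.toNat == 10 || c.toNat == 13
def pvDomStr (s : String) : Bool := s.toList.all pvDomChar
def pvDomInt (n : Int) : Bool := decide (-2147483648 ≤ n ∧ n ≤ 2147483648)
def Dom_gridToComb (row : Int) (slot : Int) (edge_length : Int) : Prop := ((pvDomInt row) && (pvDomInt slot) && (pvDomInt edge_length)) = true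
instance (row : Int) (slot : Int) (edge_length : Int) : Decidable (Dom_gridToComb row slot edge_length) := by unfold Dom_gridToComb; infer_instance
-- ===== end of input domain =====

-- B replaces A's O(row) accumulation loop with closed-form arithmetic-series sums (O(1)); return values agree everywhere.

-- ===== PORT A =====
-- loop body of A's `for i in range(1, row)` over the state (combID, adder)
def pvStep (n : Int) (p : Int × Int) (i : Int) : Int × Int :=
  (p.1 + n + p.2, if i < n then p.2 + 1 else p.2 - 1)

def gridToComb (row : Int) (slot : Int) (edge_length : Int) : Int :=
  if row ≤ 0 ∨ 2 * edge_length - 1 < row then 0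
  else if slot ≤ 0 ∨ (row ≤ edge_length ∧ edge_length + row ≤ slot) ∨
      (edge_length < row ∧ 3 * edge_length - row - 1 < slot) then 0
  else
    let st := (PySem.List.pyRange 1 row 1).foldl (pvStep edge_length) (0, 0)
    st.1 + slot

-- ===== PORT B =====
def gridToComb_alt (row : Int) (slot : Int) (edge_length : Int) : Int :=
  let n := edge_length
  if row ≤ 0 ∨ 2 * n - 1 < row then 0
  else if slot ≤ 0 ∨ (row ≤ n ∧ n + row ≤ slot) ∨
      (n < row ∧ 3 * n - row - 1 < slot) then 0
  else if row ≤ n then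
    let k := row - 1
    k * n + PySem.Int.floordiv (k * (k - 1)) 2 + slot
  else
    let m := row - 1 - n
    n * n + PySem.Int.floordiv (n * (n - 1)) 2 + m * (2 * n - 2)
      - PySem.Int.floordiv (m * (m - 1)) 2 + slot

-- ===== PRECONDITION & SPEC =====
def Spec_gridToComb (row : Int) (slot : Int) (edge_length : Int) (out : Int) : Prop := out = gridToComb_alt row slot edge_length
instance (row : Int) (slot : Int) (edge_length : Int) (out : Int) : Decidable (Spec_gridToComb row slot edge_length out) := by unfold Spec_gridToComb; infer_instance

-- ===== CLAIM (what is proved, stated in full; the proofs are below) =====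
def Claim_equal_gridToComb : Prop := ∀ (row : Int) (slot : Int) (edge_length : Int), Dom_gridToComb row slot edge_length → Spec_gridToComb row slot edge_length (gridToComb row slot edge_length)

-- ===== LEMMAS AND PROOFS =====

-- invariant of A's loop after m iterations (i = 1 .. m), for edge_length ≥ 1
theorem pvLoop_inv (n : Int) (hn : 1 ≤ n) (m : Nat) :
    ((PySem.List.pyRange 1 (1 + (m : Int)) 1).foldl (pvStep n) (0, 0)).2
      = (if (m : Int) < n then (m : Int) else 2 * n - 2 - (m : Int)) ∧
    2 * ((PySem.List.pyRange 1 (1 + (m : Int)) 1).foldl (pvStep n) (0, 0)).1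
      = (if (m : Int) ≤ n then 2 * (m : Int) * n + (m : Int) * ((m : Int) - 1)
         else 2 * n * n + n * (n - 1) + 2 * ((m : Int) - n) * (2 * n - 2)
              - ((m : Int) - n) * ((m : Int) - n - 1)) := by
  induction m with
  | zero =>
    rw [PySem.List.pyRange_one_eq_nil (by omega)]
    simp only [List.foldl_nil, Nat.cast_zero]
    rw [if_pos (by omega), if_pos (by omega)]
    constructor <;> ring
  | succ m ih =>
    obtain ⟨ih2, ih1⟩ := ih
    have hsplit : PySem.List.pyRange 1 (1 + ((m : Int) + 1)) 1
        = PySem.List.pyRange 1 (1 + (m : Int)) 1 ++ [1 + (m : Int)] := by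
      have h := PySem.List.pyRange_one_succ_right (a := (1:Int)) (b := 1 + (m : Int)) (by omega)
      rw [show (1 : Int) + ((m : Int) + 1) = (1 + (m : Int)) + 1 by ring, h]
    push_cast
    rw [hsplit, List.foldl_append]
    simp only [List.foldl_cons, List.foldl_nil, pvStep]
    constructor
    · split_ifs at ih2 ⊢ <;> omega
    · by_cases hc : (m : Int) + 1 ≤ n
      · rw [if_pos (show (m : Int) ≤ n by omega)] at ih1
        rw [if_pos (show (m : Int) < n by omega)] at ih2
        rw [if_pos hc]
        linarith
      · by_cases hc2 : (m : Int) ≤ n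
        · have hmn : (m : Int) = n := by omega
          rw [if_pos hc2] at ih1
          rw [if_neg (by omega)] at ih2
          rw [if_neg hc]
          rw [hmn] at ih1 ih2 ⊢
          nlinarith [ih1, ih2]
        · rw [if_neg hc2] at ih1
          rw [if_neg (by omega)] at ih2
          rw [if_neg hc]
          nlinarith [ih1, ih2]

theorem gridToComb_eq (row : Int) (slot : Int) (edge_length : Int) :
    gridToComb row slot edge_length = gridToComb_alt row slot edge_length := by
  by_cases hg1 : row ≤ 0 ∨ 2 * edge_length - 1 < row
  · rw [gridToComb, gridToComb_alt, if_pos hg1, if_pos hg1]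
  by_cases hg2 : slot ≤ 0 ∨ (row ≤ edge_length ∧ edge_length + row ≤ slot) ∨
      (edge_length < row ∧ 3 * edge_length - row - 1 < slot)
  · rw [gridToComb, gridToComb_alt, if_neg hg1, if_neg hg1, if_pos hg2, if_pos hg2]
  · have hn : 1 ≤ edge_length := by omega
    obtain ⟨m, hm⟩ : ∃ m : Nat, row = 1 + (m : Int) := ⟨(row - 1).toNat, by omega⟩
    subst hm
    obtain ⟨hadd, hcomb⟩ := pvLoop_inv edge_length hn m
    have e1 : 2 * PySem.Int.floordiv (((m : Int)) * ((m : Int) - 1)) 2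
        = (m : Int) * ((m : Int) - 1) := by
      have hd : (2 : Int) ∣ (m : Int) * ((m : Int) - 1) := by
        rcases Int.even_or_odd (m : Int) with he | ho
        · exact Dvd.dvd.mul_right he.two_dvd _
        · obtain ⟨k, hk⟩ := ho
          exact Dvd.dvd.mul_left (⟨k, by omega⟩ : (2:Int) ∣ (m : Int) - 1) _
      have h := PySem.Int.floordiv_mul_add_mod ((m : Int) * ((m : Int) - 1)) 2
      have hm0 : PySem.Int.mod ((m : Int) * ((m : Int) - 1)) 2 = 0 :=
        (PySem.Int.mod_eq_zero_iff_dvd _ _).mpr hd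
      rw [hm0] at h; linarith
    have e2 : 2 * PySem.Int.floordiv (((m : Int) - edge_length) * ((m : Int) - edge_length - 1)) 2
        = ((m : Int) - edge_length) * ((m : Int) - edge_length - 1) := by
      have hd : (2 : Int) ∣ ((m : Int) - edge_length) * ((m : Int) - edge_length - 1) := by
        rcases Int.even_or_odd ((m : Int) - edge_length) with he | ho
        · exact Dvd.dvd.mul_right he.two_dvd _
        · obtain ⟨k, hk⟩ := ho
          exact Dvd.dvd.mul_left (⟨k, by omega⟩ : (2:Int) ∣ (m : Int) - edge_length - 1) _
      have h := PySem.Int.floordiv_mul_add_mod (((m : Int) - edge_length) * ((m : Int) - edge_length - 1)) 2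
      have hm0 : PySem.Int.mod (((m : Int) - edge_length) * ((m : Int) - edge_length - 1)) 2 = 0 :=
        (PySem.Int.mod_eq_zero_iff_dvd _ _).mpr hd
      rw [hm0] at h; linarith
    have e3 : 2 * PySem.Int.floordiv (edge_length * (edge_length - 1)) 2
        = edge_length * (edge_length - 1) := by
      have hd : (2 : Int) ∣ edge_length * (edge_length - 1) := by
        rcases Int.even_or_odd edge_length with he | ho
        · exact Dvd.dvd.mul_right he.two_dvd _
        · obtain ⟨k, hk⟩ := ho
          exact Dvd.dvd.mul_left (⟨k, by omega⟩ : (2:Int) ∣ edge_length - 1) _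
      have h := PySem.Int.floordiv_mul_add_mod (edge_length * (edge_length - 1)) 2
      have hm0 : PySem.Int.mod (edge_length * (edge_length - 1)) 2 = 0 :=
        (PySem.Int.mod_eq_zero_iff_dvd _ _).mpr hd
      rw [hm0] at h; linarith
    rw [gridToComb, gridToComb_alt, if_neg hg1, if_neg hg1, if_neg hg2, if_neg hg2]
    simp only [show (1:Int) + (m:Int) - 1 = (m:Int) by ring]
    by_cases hr : 1 + (m : Int) ≤ edge_length
    · rw [if_pos hr]
      rw [if_pos (show (m : Int) ≤ edge_length by omega)] at hcomb
      linarith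
    · rw [if_neg hr]
      by_cases hme : (m : Int) ≤ edge_length
      · -- boundary row = edge_length + 1, i.e. m = edge_length
        have hmn : (m : Int) = edge_length := by omega
        rw [if_pos hme] at hcomb
        rw [hmn] at hcomb e2 ⊢
        linarith
      · rw [if_neg hme] at hcomb
        linarith

-- ===== VERDICT (by name: the statement is the Claim_ definition above) =====
theorem gridToComb_spec : Claim_equal_gridToComb := by
  intro row slot edge_length _
  unfold Spec_gridToComb
  exact gridToComb_eq row slot edge_length
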